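-- pv_equiv track=rewrite | github.com/virinchimanepalli/hackerrank | sparse_arrays.py | array
-- ===== SOURCE A (Python) =====
-- def array(st,qr):
--     fm = dict()
--     k = []
--     for i in range(len(st)):
--         if st[i] in fm.keys():
--             # pass
--             fm[st[i]] +=1
--         else:
--             fm[st[i]] = 1
--     for i in range(len(qr)):
--         if qr[i] in fm.keys():
--             k.append(fm[qr[i]])
--         else:
--             k.append(0)
--     return k
-- ===== SOURCE B (Python) =====
-- def array(st, qr):
--     return [sum(1 for x in st if x == q) for q in qr]
-- ===== Notes on version B (the rewrite author's own statement) =====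
-- stated objective: simpler
-- what changed: B drops the frequency dictionary and answers each query by a direct element-wise scan of st (a one-line comprehension summing equalities), instead of building an index table and looking queries up in it.
import Mathlib
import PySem

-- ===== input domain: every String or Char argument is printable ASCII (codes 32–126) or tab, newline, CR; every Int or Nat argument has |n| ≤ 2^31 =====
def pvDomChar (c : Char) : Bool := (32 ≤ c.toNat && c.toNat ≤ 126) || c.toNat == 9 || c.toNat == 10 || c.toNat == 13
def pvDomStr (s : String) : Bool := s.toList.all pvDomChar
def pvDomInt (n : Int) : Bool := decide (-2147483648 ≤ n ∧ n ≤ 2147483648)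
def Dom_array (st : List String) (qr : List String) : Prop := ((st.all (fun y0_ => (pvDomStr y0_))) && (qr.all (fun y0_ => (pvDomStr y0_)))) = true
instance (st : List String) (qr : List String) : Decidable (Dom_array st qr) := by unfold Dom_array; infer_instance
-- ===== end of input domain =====

-- B replaces A's frequency-dictionary-then-lookup with a direct per-query scan of st (simpler, not faster).

-- ===== PORT A =====
def array (st : List String) (qr : List String) : List Int :=
  -- fm = dict(); first loop builds the frequency table
  let fm : PySem.Dict String Int :=
    st.foldl (fun d x => if d.contains x then d.modify x 0 (· + 1) else d.insert x 1)
      PySem.Dict.empty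
  -- second loop appends fm[qr[i]] or 0
  qr.foldl (fun k q => k ++ [if fm.contains q then fm.getD q 0 else 0]) []

-- ===== PORT B =====
def array_alt (st : List String) (qr : List String) : List Int :=
  qr.map (fun q => st.foldl (fun s x => if x == q then s + 1 else s) (0 : Int))

-- ===== PRECONDITION & SPEC =====
def Spec_array (st : List String) (qr : List String) (out : List Int) : Prop := out = array_alt st qr
instance (st : List String) (qr : List String) (out : List Int) : Decidable (Spec_array st qr out) := by unfold Spec_array; infer_instance

-- ===== CLAIM (what is proved, stated in full; the proofs are below) =====
def Claim_equal_array : Prop := ∀ (st : List String) (qr : List String), Dom_array st qr → Spec_array st qr (array st qr)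

-- ===== LEMMAS AND PROOFS =====

-- A's build loop: the table's lookup of q is the count of q in st.
theorem pv_build_getD (st : List String) (d : PySem.Dict String Int) (q : String) :
    (st.foldl (fun d x => if d.contains x then d.modify x 0 (· + 1) else d.insert x 1) d).getD q 0
      = d.getD q 0 + (st.count q : Int) := by
  induction st generalizing d with
  | nil => simp
  | cons x xs ih =>
    simp only [List.foldl_cons, ih, List.count_cons]
    by_cases hc : d.contains x
    · rw [if_pos hc, PySem.Dict.getD_modify]
      by_cases hq : q = x
      · subst hq; simp; push_cast; ring
      · simp [hq, Ne.symm hq]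
    · rw [if_neg hc, PySem.Dict.getD_insert]
      by_cases hq : q = x
      · subst hq
        have h0 : d.getD q 0 = 0 :=
          PySem.Dict.getD_of_not_contains d 0 (by simpa using hc)
        simp [h0]; push_cast; ring
      · simp [hq, Ne.symm hq]

-- A's output element is fm.getD q 0 whether or not fm contains q.
theorem pv_elem (fm : PySem.Dict String Int) (q : String) :
    (if fm.contains q then fm.getD q 0 else 0) = fm.getD q 0 := by
  by_cases hc : fm.contains q
  · simp [hc]
  · rw [if_neg hc, PySem.Dict.getD_of_not_contains fm 0 (by simpa using hc)]

-- A's append loop is a map.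
theorem pv_append_map (qr : List String) (f : String → Int) (acc : List Int) :
    qr.foldl (fun k q => k ++ [f q]) acc = acc ++ qr.map f := by
  induction qr generalizing acc with
  | nil => simp
  | cons q qs ih => simp [ih]

-- B's inner sum-of-equalities loop is the count of q in st.
theorem pv_sum_count (st : List String) (q : String) (s : Int) :
    st.foldl (fun s x => if x == q then s + 1 else s) s = s + (st.count q : Int) := by
  induction st generalizing s with
  | nil => simp
  | cons x xs ih =>
    simp only [List.foldl_cons]
    by_cases hx : x = q
    · rw [if_pos (by simp [hx]), ih, List.count_cons]
      simp [hx]; push_cast; omega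
    · rw [if_neg (by simp [hx]), ih, List.count_cons]
      simp [hx]

-- ===== VERDICT (by name: the statement is the Claim_ definition above) =====
theorem array_spec : Claim_equal_array := by
  intro st qr _
  unfold Spec_array array array_alt
  rw [pv_append_map]
  simp only [List.nil_append]
  apply List.map_congr_left
  intro q _
  rw [pv_elem, pv_build_getD, pv_sum_count]
  simp
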